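-- pv_equiv track=rewrite | github.com/shadezer0/practice-python | change_char_palindrome.py | convert_to_pal
-- ===== SOURCE A (Python) =====
-- def is_pal(s: str) -> bool:
--     """Checks whether the given string is a palindrome"""
--     return True if s == s[::-1] else False
--
-- def convert_to_pal(s: str) -> bool:
--     """Checks whether the given string can be converted
--     into a palindrome by only changing one char
--     """
--     # Since strings are immutable
--     s_list = list(s)
--     # counter to hold number of characters changed in string
--     times_changed = 0
--     for i in range(len(s) // 2):
--         # Compare corresponding pairs of chars from left and right
--         if s[i] != s[len(s) - 1 - i]:
--             # if they're not equal, set them as equal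
--             s_list[i] = s[len(s) - 1 - i]
--             s = "".join(s_list)
--             times_changed += 1
--         # if more than one char was changed
--         if times_changed > 1:
--             return False
--         if is_pal(s):
--             return True
--     # execution reaches here if len(s) is 1
--     return True
-- ===== SOURCE B (Python) =====
-- def convert_to_pal(s: str) -> bool:
--     n = len(s)
--     return sum(s[i] != s[n - 1 - i] for i in range(n // 2)) <= 1
-- ===== Notes on version B (the rewrite author's own statement) =====
-- stated objective: alternative
-- what changed: Replaced the mutate-and-re-test loop (which rewrites the string and reruns a full palindrome check every iteration) by a single pass that counts mismatched symmetric pairs and returns count <= 1.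
import Mathlib
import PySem

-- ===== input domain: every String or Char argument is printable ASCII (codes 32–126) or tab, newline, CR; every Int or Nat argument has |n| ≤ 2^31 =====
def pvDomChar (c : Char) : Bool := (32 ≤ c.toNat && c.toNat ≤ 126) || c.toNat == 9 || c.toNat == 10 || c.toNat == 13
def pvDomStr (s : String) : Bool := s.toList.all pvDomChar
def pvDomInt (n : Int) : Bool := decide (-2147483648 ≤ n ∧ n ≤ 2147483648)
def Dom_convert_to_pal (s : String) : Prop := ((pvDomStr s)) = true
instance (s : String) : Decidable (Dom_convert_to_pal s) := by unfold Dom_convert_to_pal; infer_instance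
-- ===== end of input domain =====

-- B replaces A's mutate-and-retest loop by a single pass that counts mismatched symmetric pairs (count <= 1).

-- ===== PORT A =====
-- is_pal(s): s == s[::-1]
def is_pal (l : List Char) : Bool := if l = l.reverse then true else false

-- the body of A's for-loop: state (s, s_list, times_changed); fuel = remaining iterations of
-- range(len(s)//2).  Indices i and len(s)-1-i are always in range for the iterations reached,
-- so `getD` with a default is exact for Python's s[i] / s[len(s)-1-i].
def loopA : Nat → Nat → List Char → List Char → Nat → Bool
  | 0, _, _, _, _ => true
  | fuel+1, i, s, s_list, tc =>
    let st :=
      if s.getD i ' ' ≠ s.getD (s.length - 1 - i) ' ' then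
        ((s_list.set i (s.getD (s.length - 1 - i) ' ')),
         (s_list.set i (s.getD (s.length - 1 - i) ' ')), tc + 1)
      else (s, s_list, tc)
    if st.2.2 > 1 then false
    else if is_pal st.1 then true
    else loopA fuel (i+1) st.1 st.2.1 st.2.2

def convert_to_pal (s : String) : Bool :=
  loopA (s.toList.length / 2) 0 s.toList s.toList 0

-- ===== PORT B =====
-- sum(s[i] != s[n-1-i] for i in range(n//2)) <= 1
def convert_to_pal_alt (s : String) : Bool :=
  let l := s.toList
  let n := l.length
  decide (((List.range (n / 2)).countP
      (fun i => decide (l.getD i ' ' ≠ l.getD (n - 1 - i) ' '))) ≤ 1)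

-- ===== PRECONDITION & SPEC =====
def Spec_convert_to_pal (s : String) (out : Bool) : Prop := out = convert_to_pal_alt s
instance (s : String) (out : Bool) : Decidable (Spec_convert_to_pal s out) := by unfold Spec_convert_to_pal; infer_instance

-- ===== CLAIM (what is proved, stated in full; the proofs are below) =====
def Claim_equal_convert_to_pal : Prop := ∀ (s : String), Dom_convert_to_pal s → Spec_convert_to_pal s (convert_to_pal s)

-- ===== LEMMAS AND PROOFS =====

-- number of mismatched symmetric pairs of l with index in [i, i+k)
def badCount (l : List Char) (i k : Nat) : Nat :=
  (List.range' i k).countP (fun j => decide (l.getD j ' ' ≠ l.getD (l.length - 1 - j) ' '))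

theorem pal_iff (l : List Char) :
    (l = l.reverse) ↔ ∀ j < l.length / 2, l.getD j ' ' = l.getD (l.length - 1 - j) ' ' := by
  constructor
  · intro h j hj
    have hjn : j < l.length := by omega
    have hjn2 : l.length - 1 - j < l.length := by omega
    rw [List.getD_eq_getElem _ _ hjn, List.getD_eq_getElem _ _ hjn2]
    have := List.getElem_reverse (l := l) (i := j) (h := by simpa using hjn)
    rw [← this]
    exact List.getElem_of_eq h _
  · intro h
    apply List.ext_getElem (by simp)
    intro j hj hj'
    have hjl : j < l.length := hj
    rw [List.getElem_reverse]
    by_cases hc : j < l.length / 2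
    · have := h j hc
      rw [List.getD_eq_getElem _ _ hjl, List.getD_eq_getElem _ _ (by omega)] at this
      exact this
    · by_cases hm : l.length - 1 - j < l.length / 2
      · have := h _ hm
        have h2 : l.length - 1 - (l.length - 1 - j) = j := by omega
        rw [List.getD_eq_getElem _ _ (by omega : l.length - 1 - j < l.length),
            List.getD_eq_getElem _ _ (by omega : l.length - 1 - (l.length - 1 - j) < l.length)] at this
        simp_rw [h2] at this
        exact this.symm
      · have hmid : l.length - 1 - j = j := by omega
        simp_rw [hmid]

lemma is_pal_iff (l : List Char) :
    is_pal l = true ↔ ∀ j < l.length / 2, l.getD j ' ' = l.getD (l.length - 1 - j) ' ' := by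
  rw [← pal_iff]
  simp [is_pal]

lemma badCount_succ (s : List Char) (i k : Nat) :
    badCount s i (k+1) =
      (if s.getD i ' ' = s.getD (s.length - 1 - i) ' ' then 0 else 1) + badCount s (i+1) k := by
  rw [badCount, List.range'_succ, List.countP_cons, badCount]
  by_cases h : s.getD i ' ' = s.getD (s.length - 1 - i) ' ' <;> simp [h, Nat.add_comm]

lemma badCount_eq_zero (s : List Char) (i k : Nat) :
    badCount s i k = 0 ↔ ∀ j, i ≤ j → j < i + k → s.getD j ' ' = s.getD (s.length - 1 - j) ' ' := by
  rw [badCount, List.countP_eq_zero]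
  constructor
  · intro h j h1 h2
    have := h j (List.mem_range'_1.mpr ⟨h1, h2⟩)
    simpa using this
  · intro h j hj
    have := List.mem_range'_1.mp hj
    simpa using h j this.1 this.2

lemma badCount_congr (sl s : List Char) (i k : Nat)
    (h : ∀ j, i ≤ j → j < i + k →
      (sl.getD j ' ' = sl.getD (sl.length - 1 - j) ' ' ↔ s.getD j ' ' = s.getD (s.length - 1 - j) ' ')) :
    badCount sl i k = badCount s i k := by
  apply List.countP_congr
  intro j hj
  obtain ⟨h1, h2⟩ := List.mem_range'_1.mp hj
  simpa using not_congr (h j h1 h2)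

lemma getD_set_lt (l : List Char) (i j : Nat) (c : Char) (hj : j < l.length) (hi : i < l.length) :
    (l.set i c).getD j ' ' = if i = j then c else l.getD j ' ' := by
  rw [List.getD_eq_getElem _ _ (by simpa using hj), List.getElem_set]
  split_ifs with h
  · rfl
  · rw [List.getD_eq_getElem _ _ hj]

lemma loopA_eq (fuel : Nat) : ∀ (i : Nat) (s : List Char) (tc : Nat),
    fuel + i = s.length / 2 → tc ≤ 1 →
    (∀ j, j < i → s.getD j ' ' = s.getD (s.length - 1 - j) ' ') →
    loopA fuel i s s tc = decide (tc + badCount s i fuel ≤ 1) := by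
  induction fuel with
  | zero =>
    intro i s tc hf htc hpre
    simp [loopA, badCount, htc]
  | succ fuel ih =>
    intro i s tc hf htc hpre
    have _hi : i < s.length / 2 := by omega
    have h2i : 2 * i + 2 ≤ s.length := by omega
    by_cases hmis : s.getD i ' ' = s.getD (s.length - 1 - i) ' '
    · -- matched pair
      rw [loopA]
      simp only [hmis, ne_eq, not_true_eq_false, if_false, if_neg (by omega : ¬ tc > 1)]
      rw [badCount_succ, if_pos hmis]
      by_cases hp : is_pal s = true
      · rw [if_pos hp]
        have h0 : badCount s (i+1) fuel = 0 := by
          rw [badCount_eq_zero]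
          intro j h1 h2
          exact (is_pal_iff s).mp hp j (by omega)
        rw [h0]
        simp [htc]
      · rw [if_neg hp]
        rw [ih (i+1) s tc (by omega) htc ?_]
        · rw [decide_eq_decide]; omega
        · intro j hj
          rcases Nat.lt_or_ge j i with h | h
          · exact hpre j h
          · have : j = i := by omega
            subst this; exact hmis
    · -- mismatched pair: fix it
      rw [loopA]
      simp only [hmis, ne_eq, not_false_eq_true, if_true]
      set c := s.getD (s.length - 1 - i) ' ' with hc
      set sl := s.set i c with hsl
      have hlen : sl.length = s.length := by simp [hsl]
      have hin : i < s.length := by omega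
      -- pairs of sl at indices < i are matched (they were matched in s and position i is untouched)
      have hpair_lt : ∀ j, j < i → sl.getD j ' ' = sl.getD (sl.length - 1 - j) ' ' := by
        intro j hj
        rw [hsl, getD_set_lt _ _ _ _ (by omega) hin, getD_set_lt _ _ _ _ (by simp; omega) hin,
            if_neg (by omega), if_neg (by simp; omega), List.length_set]
        exact hpre j hj
      -- the fixed pair i is matched
      have hpair_i : sl.getD i ' ' = sl.getD (sl.length - 1 - i) ' ' := by
        rw [hsl, getD_set_lt _ _ _ _ hin hin, getD_set_lt _ _ _ _ (by simp; omega) hin,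
            if_pos rfl, if_neg (by simp; omega), List.length_set]
      -- pairs at indices > i are untouched
      have hpair_gt : ∀ j, i < j → j < s.length / 2 →
          (sl.getD j ' ' = sl.getD (sl.length - 1 - j) ' ' ↔
            s.getD j ' ' = s.getD (s.length - 1 - j) ' ') := by
        intro j h1 h2
        have h2j : 2 * j + 2 ≤ s.length := by omega
        rw [hsl, getD_set_lt _ _ _ _ (by omega) hin, getD_set_lt _ _ _ _ (by simp; omega) hin,
            if_neg (by omega), if_neg (by simp; omega), List.length_set]
      have hisp : is_pal sl = true ↔ badCount s (i+1) fuel = 0 := by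
        rw [is_pal_iff, badCount_eq_zero]
        constructor
        · intro h j h1 h2
          exact (hpair_gt j (by omega) (by omega)).mp (h j (by rw [hlen]; omega))
        · intro h j hj
          rw [hlen] at hj
          rcases Nat.lt_trichotomy j i with hlt | heq | hgt
          · exact hpair_lt j hlt
          · subst heq; exact hpair_i
          · exact (hpair_gt j hgt hj).mpr (h j (by omega) (by omega))
      by_cases htc1 : tc + 1 > 1
      · rw [if_pos htc1]
        rw [badCount_succ, if_neg hmis]
        symm
        rw [decide_eq_false_iff_not]
        omega
      · rw [if_neg htc1]
        have htc0 : tc = 0 := by omega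
        subst htc0
        by_cases hp : is_pal sl = true
        · rw [if_pos hp]
          rw [badCount_succ, if_neg hmis, hisp.mp hp]
          simp
        · rw [if_neg hp]
          rw [ih (i+1) sl 1 (by rw [hlen]; omega) (le_refl 1) ?_]
          · rw [badCount_congr sl s (i+1) fuel
              (fun j h1 h2 => hpair_gt j (by omega) (by omega)),
              badCount_succ, if_neg hmis, decide_eq_decide]
            omega
          · intro j hj
            rcases Nat.lt_or_ge j i with hlt | hge
            · exact hpair_lt j hlt
            · have : j = i := by omega
              subst this; exact hpair_i

-- ===== VERDICT (by name: the statement is the Claim_ definition above) =====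
theorem convert_to_pal_spec : Claim_equal_convert_to_pal := by
  intro s _
  unfold Spec_convert_to_pal convert_to_pal convert_to_pal_alt
  rw [loopA_eq _ 0 _ 0 (by omega) (by omega) (by omega)]
  simp [badCount, List.range_eq_range']
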